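-- pv_equiv track=rewrite | github.com/kalimullina/-RenataKalimullinaPython | hws/hw1.py | major_and_minor_elem
-- ===== SOURCE A (Python) =====
-- from typing import List, Tuple
--
-- def major_and_minor_elem(inp: List) -> Tuple[int, int]:
--     frequency_dict = {}
--     for elem in inp:
--         if elem in frequency_dict:
--             frequency_dict[elem] += 1
--         else:
--             frequency_dict[elem] = 1
--
--     most_common_elem = max(frequency_dict, key=frequency_dict.get)
--     least_common_elem = min(frequency_dict, key=frequency_dict.get)
--     for elem in frequency_dict:
--         if frequency_dict[elem] > frequency_dict[most_common_elem]:
--             most_common_elem = elem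
--         elif frequency_dict[elem] < frequency_dict[least_common_elem]:
--             least_common_elem = elem
--
--     if frequency_dict[most_common_elem] > len(inp) // 2:
--         return most_common_elem, least_common_elem
--     else:
--         return [most_common_elem, None]
-- ===== SOURCE B (Python) =====
-- def major_and_minor_elem(inp):
--     freq = {}
--     for x in inp:
--         freq[x] = freq.get(x, 0) + 1
--     items = list(freq.items())
--     most = sorted(items, key=lambda kv: -kv[1])[0][0]
--     least = sorted(items, key=lambda kv: kv[1])[0][0]
--     if freq[most] > len(inp) // 2:
--         return most, least
--     return [most, None]
-- ===== Notes on version B (the rewrite author's own statement) =====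
-- stated objective: alternative
-- what changed: A's max()/min() scans plus its redundant second pass over the dict are replaced by two stable sorts of the counted items (descending/ascending by count) whose heads give the majority and least-frequent elements with the same first-seen tie-breaking.
-- outside the precondition, e.g. on major_and_minor_elem([]): A raises ValueError, B raises IndexError
import Mathlib
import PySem

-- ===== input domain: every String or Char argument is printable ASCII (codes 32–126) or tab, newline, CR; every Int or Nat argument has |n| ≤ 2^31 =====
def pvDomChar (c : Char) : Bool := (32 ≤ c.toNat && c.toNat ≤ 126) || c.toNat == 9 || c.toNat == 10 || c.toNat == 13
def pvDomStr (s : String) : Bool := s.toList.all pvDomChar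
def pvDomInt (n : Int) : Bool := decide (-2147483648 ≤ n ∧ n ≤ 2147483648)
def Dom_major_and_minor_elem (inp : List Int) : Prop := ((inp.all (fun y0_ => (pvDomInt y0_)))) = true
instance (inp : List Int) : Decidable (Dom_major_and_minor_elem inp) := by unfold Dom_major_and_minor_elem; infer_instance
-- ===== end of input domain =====

-- B replaces A's max/min scan plus A's redundant second pass over the dict by two stable
-- sorts of the counted items (descending / ascending by count), reading off the heads;
-- objective: alternative (same result, genuinely different mechanism, not claimed faster).

-- ===== PORT A =====
-- max(frequency_dict, key=frequency_dict.get) / min(...): first extremal key of the dict,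
-- key function reads the stored count (every iterated key is present, so getD k 0 is that count).
-- The '| _, _' fallback is unreachable: max?/min? are none only for an empty dict (inp = []),
-- where Python raises ValueError — excluded by Pre_.
def major_and_minor_elem (inp : List Int) : Int × Option Int :=
  let fd := inp.foldl
    (fun d e => if d.contains e then d.modify e 0 (· + 1) else d.insert e 1)
    PySem.Dict.empty
  match PySem.List.max? fd.keys (fun k => fd.getD k 0),
        PySem.List.min? fd.keys (fun k => fd.getD k 0) with
  | some mc0, some lc0 =>
    let ml := fd.keys.foldl
      (fun (p : Int × Int) e =>
        if fd.getD e 0 > fd.getD p.1 0 then (e, p.2)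
        else if fd.getD e 0 < fd.getD p.2 0 then (p.1, e)
        else p) (mc0, lc0)
    if fd.getD ml.1 0 > PySem.Int.floordiv (inp.length : Int) 2 then (ml.1, some ml.2)
    else (ml.1, none)
  | _, _ => (0, none)

-- ===== PORT B =====
-- sorted(items, key=...)[0] is the head of the stable sort; [0] raises IndexError only for
-- empty input (outside Pre_), hence the match with an unreachable '| _, _' default.
def major_and_minor_elem_alt (inp : List Int) : Int × Option Int :=
  let freq := inp.foldl (fun d x => d.insert x (d.getD x 0 + 1)) PySem.Dict.empty
  let items := freq.items
  match (PySem.List.sorted items (fun kv => -kv.2) false).head? with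
  | none => (0, none)
  | some most =>
    match (PySem.List.sorted items (fun kv => kv.2) false).head? with
    | none => (0, none)
    | some least =>
      if freq.getD most.1 0 > PySem.Int.floordiv (inp.length : Int) 2 then (most.1, some least.1)
      else (most.1, none)

-- ===== PRECONDITION & SPEC =====
-- On inp = [] Python A raises ValueError (max() of an empty dict), so it is excluded.
def Pre_major_and_minor_elem (inp : List Int) : Prop := inp ≠ []
instance (inp : List Int) : Decidable (Pre_major_and_minor_elem inp) := by unfold Pre_major_and_minor_elem; infer_instance
def pvWitness_major_and_minor_elem : List Int := [1, 2, 1]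

def Spec_major_and_minor_elem (inp : List Int) (out : Int × Option Int) : Prop := out = major_and_minor_elem_alt inp
instance (inp : List Int) (out : Int × Option Int) : Decidable (Spec_major_and_minor_elem inp out) := by unfold Spec_major_and_minor_elem; infer_instance

-- ===== CLAIM (what is proved, stated in full; the proofs are below) =====
def Claim_equal_major_and_minor_elem : Prop := ∀ (inp : List Int), Dom_major_and_minor_elem inp → Pre_major_and_minor_elem inp → Spec_major_and_minor_elem inp (major_and_minor_elem inp)

-- ===== LEMMAS AND PROOFS =====

-- A's counting loop is Counter(inp): its else-branch is modify on a missing key.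
theorem pvCountStep (d : PySem.Dict Int Int) (e : Int) :
    (if d.contains e then d.modify e 0 (· + 1) else d.insert e 1) = d.modify e 0 (· + 1) := by
  by_cases h : d.contains e
  · simp [h]
  · simp only [Bool.not_eq_true] at h
    rw [if_neg (by simp [h]), PySem.Dict.modify, PySem.Dict.getD_of_not_contains _ _ h]
    norm_num

theorem pvFdEqCounter (inp : List Int) :
    inp.foldl (fun d e => if d.contains e then d.modify e 0 (· + 1) else d.insert e 1)
      PySem.Dict.empty = PySem.Dict.counter inp := by
  rw [PySem.Dict.counter_eq_foldl]
  exact PySem.List.foldl_congr_mem _ _ _ _ (fun d e _ => pvCountStep d e)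

-- head of a stable insertion sort = the running first-minimum of the keys
theorem pvHeadInsertBy {α : Type} (before : α → α → Bool) (x : α) (acc : List α) :
    (PySem.List.insertBy before x acc).head? =
      (match acc.head? with
       | none => some x
       | some m => if before x m then some x else some m) := by
  cases acc with
  | nil => rfl
  | cons y ys =>
    simp only [PySem.List.insertBy, List.head?_cons]
    split <;> simp_all

theorem pvHeadFoldlInsertBy {α : Type} (before : α → α → Bool) :
    ∀ (xs : List α) (acc : List α),
      (xs.foldl (fun a x => PySem.List.insertBy before x a) acc).head? =
        xs.foldl
          (fun h x => match h with
            | none => some x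
            | some m => if before x m then some x else some m) acc.head? := by
  intro xs
  induction xs with
  | nil => intro acc; rfl
  | cons x t ih =>
    intro acc
    simp only [List.foldl_cons]
    rw [ih, pvHeadInsertBy]

-- head of sorted(xs, key) is min(xs, key=key) (the FIRST minimal element, by stability)
theorem pvHeadSortedEqMin {α : Type} (xs : List α) (key : α → Int) :
    (PySem.List.sorted xs key false).head? = PySem.List.min? xs key := by
  simp only [PySem.List.sorted, PySem.List.min?]
  rw [pvHeadFoldlInsertBy]
  simp only [List.head?_nil]
  apply PySem.List.foldl_congr_mem
  intro h x _
  cases h <;> simp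

theorem pvMinMap {α β : Type} (l : List α) (f : α → β) (key : β → Int) :
    PySem.List.min? (l.map f) key = (PySem.List.min? l (fun a => key (f a))).map f := by
  simp only [PySem.List.min?, List.foldl_map]
  have : ∀ (l : List α) (h : Option α),
      l.foldl (fun acc a => match acc with
        | none => some (f a)
        | some m => if key (f a) < key m then some (f a) else some m) (h.map f) =
      (l.foldl (fun acc a => match acc with
        | none => some a
        | some m => if key (f a) < key (f m) then some a else some m) h).map f := by
    intro l
    induction l with
    | nil => intro h; rfl
    | cons a t ih =>
      intro h
      simp only [List.foldl_cons]
      cases h with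
      | none => exact ih (some a)
      | some m =>
        simp only [Option.map_some]
        by_cases hc : key (f a) < key (f m)
        · simp only [if_pos hc]
          simpa using ih (some a)
        · simp only [if_neg hc]
          simpa using ih (some m)
  exact this l none

theorem pvMaxEqMinNeg {α : Type} (xs : List α) (key : α → Int) :
    PySem.List.max? xs key = PySem.List.min? xs (fun a => -(key a)) := by
  simp only [PySem.List.max?, PySem.List.min?]
  apply PySem.List.foldl_congr_mem
  intro h x _
  cases h with
  | none => rfl
  | some m =>
    have : (-(key x) < -(key m)) ↔ (key m < key x) := by omega
    simp only [this]

-- A's second pass over the dict never fires: most/least are already extremal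
theorem pvLoopNoop (cnt : Int → Int) :
    ∀ (l : List Int) (p : Int × Int),
      (∀ e ∈ l, cnt e ≤ cnt p.1 ∧ cnt p.2 ≤ cnt e) →
      l.foldl (fun (p : Int × Int) e =>
        if cnt e > cnt p.1 then (e, p.2)
        else if cnt e < cnt p.2 then (p.1, e)
        else p) p = p := by
  intro l
  induction l with
  | nil => intro p _; rfl
  | cons x t ih =>
    intro p h
    have hx := h x (by simp)
    simp only [List.foldl_cons]
    have h1 : ¬ (cnt x > cnt p.1) := by omega
    have h2 : ¬ (cnt x < cnt p.2) := by omega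
    simp only [h1, if_false, h2, gt_iff_lt]
    exact ih p (fun e he => h e (by simp [he]))

-- ===== VERDICT (by name: the statement is the Claim_ definition above) =====
theorem major_and_minor_elem_spec : Claim_equal_major_and_minor_elem := by
  intro inp _ hpre
  unfold Spec_major_and_minor_elem major_and_minor_elem major_and_minor_elem_alt
  have hcnt : ∀ k : Int, (PySem.Dict.counter inp).getD k 0 = (inp.count k : Int) :=
    fun k => PySem.Dict.getD_counter inp k
  have hkeys : (PySem.Dict.counter inp).keys = PySem.Set.ofList inp := PySem.Dict.keys_counter inp
  have hne : (PySem.Dict.counter inp).keys ≠ [] := by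
    rw [hkeys]
    cases inp with
    | nil => exact absurd rfl hpre
    | cons a t =>
      intro hcontra
      have ha : a ∈ PySem.Set.ofList (a :: t) := (PySem.Set.mem_ofList (a :: t) a).mpr (by simp)
      rw [hcontra] at ha
      exact absurd ha (by simp)
  obtain ⟨M, hM⟩ : ∃ M, PySem.List.max? (PySem.Dict.counter inp).keys
      (fun k => (PySem.Dict.counter inp).getD k 0) = some M := by
    cases hmx : PySem.List.max? (PySem.Dict.counter inp).keys
        (fun k => (PySem.Dict.counter inp).getD k 0) with
    | none => exact absurd ((PySem.List.max?_eq_none_iff _ _).mp hmx) hne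
    | some m => exact ⟨m, rfl⟩
  obtain ⟨L, hL⟩ : ∃ L, PySem.List.min? (PySem.Dict.counter inp).keys
      (fun k => (PySem.Dict.counter inp).getD k 0) = some L := by
    cases hmn : PySem.List.min? (PySem.Dict.counter inp).keys
        (fun k => (PySem.Dict.counter inp).getD k 0) with
    | none => exact absurd ((PySem.List.min?_eq_none_iff _ _).mp hmn) hne
    | some m => exact ⟨m, rfl⟩
  have hitems : (PySem.Dict.counter inp).items =
      (PySem.Set.ofList inp).map (fun k => (k, (inp.count k : Int))) :=
    PySem.Dict.items_counter inp
  have hmost : (PySem.List.sorted (PySem.Dict.counter inp).items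
      (fun kv : Int × Int => -kv.2) false).head? = some (M, (inp.count M : Int)) := by
    rw [pvHeadSortedEqMin, hitems, pvMinMap]
    have heq : PySem.List.min? (PySem.Set.ofList inp)
        (fun a => -((fun k : Int => (k, (inp.count k : Int))) a).2) =
        PySem.List.max? (PySem.Dict.counter inp).keys
          (fun k => (PySem.Dict.counter inp).getD k 0) := by
      rw [pvMaxEqMinNeg, hkeys]
      simp only [PySem.List.min?]
      apply PySem.List.foldl_congr_mem
      intro h x _
      cases h <;> simp [hcnt]
    rw [heq, hM]
    rfl
  have hleast : (PySem.List.sorted (PySem.Dict.counter inp).items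
      (fun kv : Int × Int => kv.2) false).head? = some (L, (inp.count L : Int)) := by
    rw [pvHeadSortedEqMin, hitems, pvMinMap]
    have heq : PySem.List.min? (PySem.Set.ofList inp)
        (fun a => ((fun k : Int => (k, (inp.count k : Int))) a).2) =
        PySem.List.min? (PySem.Dict.counter inp).keys
          (fun k => (PySem.Dict.counter inp).getD k 0) := by
      rw [hkeys]
      simp only [PySem.List.min?]
      apply PySem.List.foldl_congr_mem
      intro h x _
      cases h <;> simp [hcnt]
    rw [heq, hL]
    rfl
  have hnoop : (PySem.Dict.counter inp).keys.foldl
      (fun (p : Int × Int) e =>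
        if (PySem.Dict.counter inp).getD e 0 > (PySem.Dict.counter inp).getD p.1 0 then (e, p.2)
        else if (PySem.Dict.counter inp).getD e 0 < (PySem.Dict.counter inp).getD p.2 0 then (p.1, e)
        else p) (M, L) = (M, L) := by
    apply pvLoopNoop (fun k => (PySem.Dict.counter inp).getD k 0)
    intro e he
    exact ⟨PySem.List.max?_isMax hM e he, PySem.List.min?_isMin hL e he⟩
  simp only [pvFdEqCounter, PySem.Dict.foldl_insert_getD_add_one_eq_counter,
    hM, hL, hmost, hleast]
  rw [hnoop]
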